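-- pv_equiv track=rewrite | github.com/CesarSanchez19/T2_Matriz | Exercise/10_Ordenar_Matriz.py | ordenar_matriz
-- ===== SOURCE A (Python) =====
-- def ordenar_matriz(matriz):
--     #conversion de matriz bidimensional a una fila plana
--     lista = [elemento for fila in matriz for elemento in fila]
--
--     #metodo de la burbuja
--     n = len(lista)
--     for h in range(n):
--         for y in range(0, n - h - 1):
--             if lista[y] > lista[y + 1]:
--                 lista[y], lista[y + 1] = lista[y + 1], lista[y]
--
--     #reconstruye la matriz con los elementos ordenados
--     filas = len(matriz)
--     columnas = len(matriz[0])
--     return [lista[h * columnas:(h + 1) * columnas] for h in range(filas)]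
-- ===== SOURCE B (Python) =====
-- # Same flatten/reshape as A, but the quadratic bubble sort is replaced by a
-- # recursive merge sort (divide and conquer).
--
-- def _fusionar(izq, der):
--     resultado = []
--     i = 0
--     j = 0
--     while i < len(izq) and j < len(der):
--         if izq[i] <= der[j]:
--             resultado.append(izq[i])
--             i += 1
--         else:
--             resultado.append(der[j])
--             j += 1
--     resultado.extend(izq[i:])
--     resultado.extend(der[j:])
--     return resultado
--
-- def _ordenar_fusion(lista):
--     if len(lista) <= 1:
--         return lista
--     mitad = len(lista) // 2
--     return _fusionar(_ordenar_fusion(lista[:mitad]), _ordenar_fusion(lista[mitad:]))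
--
-- def ordenar_matriz(matriz):
--     lista = [elemento for fila in matriz for elemento in fila]
--     lista = _ordenar_fusion(lista)
--     filas = len(matriz)
--     columnas = len(matriz[0])
--     return [lista[h * columnas:(h + 1) * columnas] for h in range(filas)]
-- ===== Notes on version B (the rewrite author's own statement) =====
-- stated objective: faster
-- what changed: The in-place quadratic bubble sort over the flattened list is replaced by a recursive merge sort (split in halves, recurse, merge with <=); flatten and reshape are unchanged.
import Mathlib
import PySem

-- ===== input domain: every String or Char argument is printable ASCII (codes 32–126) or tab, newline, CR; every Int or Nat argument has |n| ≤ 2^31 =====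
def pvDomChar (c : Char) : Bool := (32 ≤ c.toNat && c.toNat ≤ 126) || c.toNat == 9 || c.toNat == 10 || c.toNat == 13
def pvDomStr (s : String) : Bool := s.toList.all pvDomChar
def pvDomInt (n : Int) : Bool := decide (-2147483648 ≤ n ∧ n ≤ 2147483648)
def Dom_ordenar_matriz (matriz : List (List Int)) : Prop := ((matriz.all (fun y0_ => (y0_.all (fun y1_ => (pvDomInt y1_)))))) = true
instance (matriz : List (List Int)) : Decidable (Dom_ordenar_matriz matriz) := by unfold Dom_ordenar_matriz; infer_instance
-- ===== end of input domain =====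

-- B replaces A's quadratic bubble sort of the flattened list by a recursive merge sort
-- (asymptotically faster); flatten and reshape are identical, so both raise on [] (excluded by Pre_).

-- ===== PORT A =====

-- one bubble-sort comparison/swap step: 'if lista[y] > lista[y+1]: swap'
def pvSwapStep (l : List Int) (y : Nat) : List Int :=
  match PySem.List.pyGet? l (y : Int), PySem.List.pyGet? l ((y : Int) + 1) with
  | some a, some b => if a > b then (l.set y b).set (y + 1) a else l
  | _, _ => l

def ordenar_matriz (matriz : List (List Int)) : List (List Int) :=
  -- lista = [elemento for fila in matriz for elemento in fila]
  let lista := matriz.flatMap (fun fila => fila)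
  -- n = len(lista); nested bubble-sort loops
  let n : Int := (lista.length : Int)
  let lista :=
    (PySem.List.pyRange 0 n).foldl
      (fun acc h =>
        (PySem.List.pyRange 0 (n - h - 1)).foldl
          (fun acc2 y => pvSwapStep acc2 y.toNat) acc)
      lista
  -- filas = len(matriz); columnas = len(matriz[0])  (raises IndexError on [], outside Pre_)
  match PySem.List.pyGet? matriz 0 with
  | none => []
  | some fila0 =>
    let columnas : Int := (fila0.length : Int)
    (PySem.List.pyRange 0 (matriz.length : Int)).map
      (fun h => PySem.List.slice lista (some (h * columnas)) (some ((h + 1) * columnas)))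

-- ===== PORT B =====

-- _fusionar: merge two runs, taking the smaller front element (<= prefers the left)
def pvFusionar : List Int → List Int → List Int
  | [], der => der
  | izq, [] => izq
  | x :: izq, y :: der =>
    if x ≤ y then x :: pvFusionar izq (y :: der) else y :: pvFusionar (x :: izq) der

-- _ordenar_fusion: length ≤ 1 → done, else split at len//2, recurse, merge
def pvOrdenarFusion (lista : List Int) : List Int :=
  if lista.length ≤ 1 then lista
  else
    let mitad := lista.length / 2
    pvFusionar (pvOrdenarFusion (lista.take mitad)) (pvOrdenarFusion (lista.drop mitad))
termination_by lista.length
decreasing_by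
  · simp [List.length_take]; omega
  · simp [List.length_drop]; omega

def ordenar_matriz_alt (matriz : List (List Int)) : List (List Int) :=
  let lista := matriz.flatMap (fun fila => fila)
  let lista := pvOrdenarFusion lista
  match PySem.List.pyGet? matriz 0 with
  | none => []
  | some fila0 =>
    let columnas : Int := (fila0.length : Int)
    (PySem.List.pyRange 0 (matriz.length : Int)).map
      (fun h => PySem.List.slice lista (some (h * columnas)) (some ((h + 1) * columnas)))

-- ===== PRECONDITION & SPEC =====
-- Pre_ excludes only the empty matrix, on which both A and B raise IndexError at len(matriz[0]).
def Pre_ordenar_matriz (matriz : List (List Int)) : Prop := matriz ≠ []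
instance (matriz : List (List Int)) : Decidable (Pre_ordenar_matriz matriz) := by
  unfold Pre_ordenar_matriz; infer_instance

def pvWitness_ordenar_matriz : List (List Int) := [[3, 1], [4, 2]]

def Spec_ordenar_matriz (matriz : List (List Int)) (out : List (List Int)) : Prop := out = ordenar_matriz_alt matriz
instance (matriz : List (List Int)) (out : List (List Int)) : Decidable (Spec_ordenar_matriz matriz out) := by unfold Spec_ordenar_matriz; infer_instance

-- ===== CLAIM (what is proved, stated in full; the proofs are below) =====
def Claim_equal_ordenar_matriz : Prop := ∀ (matriz : List (List Int)), Dom_ordenar_matriz matriz → Pre_ordenar_matriz matriz → Spec_ordenar_matriz matriz (ordenar_matriz matriz)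

-- ===== LEMMAS AND PROOFS =====

theorem pvSwapStep_nil (y : Nat) : pvSwapStep [] y = [] := by
  simp [pvSwapStep, PySem.List.pyGet?]

theorem pvSwapStep_singleton (a : Int) (y : Nat) : pvSwapStep [a] y = [a] := by
  have h1 : PySem.List.pyGet? [a] ((y : Int) + 1) = none := by
    have h0 : ((y : Int) + 1) = ((y + 1 : Nat) : Int) := by push_cast; ring
    rw [h0, PySem.List.pyGet?_natCast]
    simp
  unfold pvSwapStep
  rw [h1]
  rcases PySem.List.pyGet? [a] (y : Int) with _ | a' <;> rfl

theorem pvSwapStep_cons_succ (x : Int) (l : List Int) (y : Nat) :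
    pvSwapStep (x :: l) (y + 1) = x :: pvSwapStep l y := by
  have e1 : PySem.List.pyGet? (x :: l) ((y + 1 : Nat) : Int) = PySem.List.pyGet? l (y : Int) := by
    rw [PySem.List.pyGet?_natCast, PySem.List.pyGet?_natCast]; simp
  have e2 : PySem.List.pyGet? (x :: l) (((y + 1 : Nat) : Int) + 1) =
      PySem.List.pyGet? l ((y : Int) + 1) := by
    have h1 : (((y + 1 : Nat) : Int) + 1) = ((y + 2 : Nat) : Int) := by push_cast; ring
    have h2 : ((y : Int) + 1) = ((y + 1 : Nat) : Int) := by push_cast; ring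
    rw [h1, h2, PySem.List.pyGet?_natCast, PySem.List.pyGet?_natCast]; simp
  unfold pvSwapStep
  rw [e1, e2]
  rcases h3 : PySem.List.pyGet? l (y : Int) with _ | a <;>
    rcases h4 : PySem.List.pyGet? l ((y : Int) + 1) with _ | b
  · rfl
  · rfl
  · rfl
  · show (if a > b then x :: (l.set y b).set (y + 1) a else x :: l) =
      x :: if a > b then (l.set y b).set (y + 1) a else l
    split <;> rfl

theorem pvSwapStep_zero (a b : Int) (t : List Int) :
    pvSwapStep (a :: b :: t) 0 = if a > b then b :: a :: t else a :: b :: t := by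
  unfold pvSwapStep
  have e1 : PySem.List.pyGet? (a :: b :: t) ((0 : Nat) : Int) = some a := by
    rw [PySem.List.pyGet?_natCast]; simp
  have e2 : PySem.List.pyGet? (a :: b :: t) (((0 : Nat) : Int) + 1) = some b := by
    have h0 : (((0 : Nat) : Int) + 1) = ((1 : Nat) : Int) := by norm_num
    rw [h0, PySem.List.pyGet?_natCast]; simp
  rw [e1, e2]
  rfl

-- the structural form of one (bounded) bubble pass
def pvBpass : Nat → List Int → List Int
  | 0, l => l
  | _ + 1, [] => []
  | _ + 1, [a] => [a]
  | m + 1, a :: b :: t => if a > b then b :: pvBpass m (a :: t) else a :: pvBpass m (b :: t)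

theorem foldl_swap_nil (ys : List Nat) (g : Nat → Nat) :
    ys.foldl (fun acc y => pvSwapStep acc (g y)) [] = [] := by
  induction ys with
  | nil => rfl
  | cons y ys ih => simp [List.foldl, pvSwapStep_nil, ih]

theorem foldl_swap_singleton (ys : List Nat) (g : Nat → Nat) (a : Int) :
    ys.foldl (fun acc y => pvSwapStep acc (g y)) [a] = [a] := by
  induction ys with
  | nil => rfl
  | cons y ys ih => simp [List.foldl, pvSwapStep_singleton, ih]

theorem foldl_swap_shift (m : Nat) :
    ∀ (k : Nat) (x : Int) (l : List Int),
      (List.range m).foldl (fun acc y => pvSwapStep acc (y + (k + 1))) (x :: l) =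
        x :: (List.range m).foldl (fun acc y => pvSwapStep acc (y + k)) l := by
  induction m with
  | zero => intro k x l; rfl
  | succ m ih =>
    intro k x l
    rw [List.range_succ_eq_map, List.foldl_cons, List.foldl_map, List.foldl_cons, List.foldl_map]
    have e0 : pvSwapStep (x :: l) (0 + (k + 1)) = x :: pvSwapStep l (0 + k) := by
      simp only [Nat.zero_add]
      exact pvSwapStep_cons_succ x l k
    rw [e0]
    have efun : (fun (acc : List Int) (y : Nat) => pvSwapStep acc (y + 1 + (k + 1))) =
        (fun acc y => pvSwapStep acc (y + ((k + 1) + 1))) := by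
      funext acc y; congr 1; omega
    have efun2 : (fun (acc : List Int) (y : Nat) => pvSwapStep acc (y + 1 + k)) =
        (fun acc y => pvSwapStep acc (y + (k + 1))) := by
      funext acc y; congr 1; omega
    rw [efun, efun2]
    exact ih (k + 1) x (pvSwapStep l (0 + k))

theorem foldl_swap_range (m : Nat) :
    ∀ l : List Int, (List.range m).foldl (fun acc y => pvSwapStep acc y) l = pvBpass m l := by
  induction m with
  | zero => intro l; rfl
  | succ m ih =>
    intro l
    rw [List.range_succ_eq_map, List.foldl_cons, List.foldl_map]
    match l with
    | [] =>
      rw [pvSwapStep_nil]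
      simpa [pvBpass] using foldl_swap_nil (List.range m) Nat.succ
    | [a] =>
      rw [pvSwapStep_singleton]
      simpa [pvBpass] using foldl_swap_singleton (List.range m) Nat.succ a
    | a :: b :: t =>
      rw [pvSwapStep_zero]
      have sh : ∀ (x : Int) (l' : List Int),
          (List.range m).foldl (fun acc y => pvSwapStep acc (y + 1)) (x :: l') =
            x :: pvBpass m l' := by
        intro x l'
        have := foldl_swap_shift m 0 x l'
        simp only [Nat.add_zero, Nat.zero_add] at this
        rw [this, ih l']
      simp only [Nat.succ_eq_add_one]
      by_cases hab : a > b
      · rw [if_pos hab, sh b (a :: t)]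
        simp [pvBpass, hab]
      · rw [if_neg hab, sh a (b :: t)]
        simp [pvBpass, hab]

theorem pvBpass_perm (m : Nat) : ∀ l : List Int, (pvBpass m l).Perm l := by
  induction m with
  | zero => intro l; simp [pvBpass]
  | succ m ih =>
    intro l
    match l with
    | [] => simp [pvBpass]
    | [a] => simp [pvBpass]
    | a :: b :: t =>
      simp only [pvBpass]
      split
      · exact ((ih (a :: t)).cons b).trans (List.Perm.swap a b t)
      · exact (ih (b :: t)).cons a

theorem pvBpass_append (m : Nat) :
    ∀ (p s : List Int), m < p.length → pvBpass m (p ++ s) = pvBpass m p ++ s := by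
  induction m with
  | zero => intro p s _; rfl
  | succ m ih =>
    intro p s hm
    match p with
    | [] => simp at hm
    | [a] => simp at hm
    | a :: b :: t =>
      simp only [List.cons_append, pvBpass]
      split
      · rw [show a :: (t ++ s) = (a :: t) ++ s from rfl,
          ih (a :: t) s (by simp at hm ⊢; omega)]
        rfl
      · rw [show b :: (t ++ s) = (b :: t) ++ s from rfl,
          ih (b :: t) s (by simp at hm ⊢; omega)]
        rfl

theorem pvBpass_full (t : List Int) :
    ∀ a : Int, ∃ p' x, pvBpass t.length (a :: t) = p' ++ [x] ∧ ∀ e ∈ a :: t, e ≤ x := by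
  induction t with
  | nil => intro a; exact ⟨[], a, rfl, by simp⟩
  | cons b t' ih =>
    intro a
    simp only [List.length_cons, pvBpass]
    by_cases hab : a > b
    · rw [if_pos hab]
      obtain ⟨p', x, hp, hx⟩ := ih a
      refine ⟨b :: p', x, by rw [hp]; rfl, ?_⟩
      intro e he
      simp only [List.mem_cons] at he
      rcases he with rfl | rfl | he
      · exact hx e (by simp)
      · exact le_trans (le_of_lt hab) (hx a (by simp))
      · exact hx e (by simp [he])
    · rw [if_neg hab]
      replace hab : a ≤ b := not_lt.mp hab
      obtain ⟨p', x, hp, hx⟩ := ih b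
      refine ⟨a :: p', x, by rw [hp]; rfl, ?_⟩
      intro e he
      simp only [List.mem_cons] at he
      rcases he with rfl | rfl | he
      · exact le_trans hab (hx b (by simp))
      · exact hx e (by simp)
      · exact hx e (by simp [he])

theorem bubble_invariant (l : List Int) :
    ∀ k : Nat, k ≤ l.length →
      ∃ p s, (List.range k).foldl (fun acc h => pvBpass (l.length - h - 1) acc) l = p ++ s ∧
        p.length = l.length - k ∧ s.Pairwise (· ≤ ·) ∧
        (∀ a ∈ p, ∀ b ∈ s, a ≤ b) ∧ (p ++ s).Perm l := by
  intro k
  induction k with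
  | zero =>
    intro _
    exact ⟨l, [], by simp, by simp, by simp, by simp, by simp⟩
  | succ k ih =>
    intro hk
    obtain ⟨p, s, hfold, hlen, hsort, hle, hperm⟩ := ih (by omega)
    rw [List.range_succ, List.foldl_append, List.foldl_cons, List.foldl_nil, hfold]
    have hplen : p.length = l.length - k := hlen
    have hpnil : p ≠ [] := by
      intro h; rw [h] at hplen; simp at hplen; omega
    obtain ⟨a, t, rfl⟩ := List.exists_cons_of_ne_nil hpnil
    have hm : l.length - k - 1 = t.length := by
      simp at hplen; omega
    rw [hm, pvBpass_append t.length (a :: t) s (by simp)]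
    obtain ⟨p', x, hp, hx⟩ := pvBpass_full t a
    rw [hp]
    have hperm' : (p' ++ [x]).Perm (a :: t) := by
      rw [← hp]; exact pvBpass_perm t.length (a :: t)
    have hxmem : x ∈ a :: t := hperm'.subset (by simp)
    have hp'sub : ∀ e ∈ p', e ∈ a :: t := fun e he => hperm'.subset (by simp [he])
    refine ⟨p', x :: s, by simp, ?_, ?_, ?_, ?_⟩
    · have := hperm'.length_eq
      simp at this ⊢
      omega
    · refine List.Pairwise.cons ?_ hsort
      intro b hb
      exact hle x hxmem b hb
    · intro e he b hb
      rcases hb with _ | ⟨_, hb⟩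
      · exact hx e (hp'sub e he)
      · exact hle e (hp'sub e he) b hb
    · have h1 : p' ++ x :: s = (p' ++ [x]) ++ s := by simp
      rw [h1]
      exact (hperm'.append_right s).trans hperm

theorem bubble_sorts (l : List Int) :
    ∃ s, (List.range l.length).foldl (fun acc h => pvBpass (l.length - h - 1) acc) l = s ∧
      s.Pairwise (· ≤ ·) ∧ s.Perm l := by
  obtain ⟨p, s, hfold, hlen, hsort, _, hperm⟩ := bubble_invariant l l.length (le_refl _)
  have : p = [] := by
    have : p.length = 0 := by omega
    exact List.length_eq_zero_iff.mp this
  subst this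
  exact ⟨s, by simpa using hfold, hsort, by simpa using hperm⟩

-- B side: merge sort is a sorted permutation
theorem pvFusionar_eq_merge : ∀ izq der : List Int,
    pvFusionar izq der = izq.merge der (fun a b => decide (a ≤ b)) := by
  intro izq der
  fun_induction pvFusionar izq der with
  | case1 der => simp
  | case2 izq h => cases izq <;> simp_all
  | case3 x izq y der hxy ih => simp [hxy, ih]
  | case4 x izq y der hxy ih => simp [hxy, ih]

theorem pvOrdenarFusion_perm (l : List Int) : (pvOrdenarFusion l).Perm l := by
  fun_induction pvOrdenarFusion l with
  | case1 l h => exact List.Perm.refl l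
  | case2 l h mitad ih1 ih2 =>
    rw [pvFusionar_eq_merge]
    exact (List.merge_perm_append _).trans
      ((ih1.append ih2).trans (List.Perm.of_eq (List.take_append_drop _ l)))

theorem pvOrdenarFusion_sorted (l : List Int) : (pvOrdenarFusion l).Pairwise (· ≤ ·) := by
  fun_induction pvOrdenarFusion l with
  | case1 l h =>
    match l, h with
    | [], _ => simp
    | [a], _ => simp
  | case2 l h mitad ih1 ih2 =>
    rw [pvFusionar_eq_merge]
    exact List.Sorted.merge ih1 ih2

theorem bubble_eq_fusion (l : List Int) :
    (List.range l.length).foldl (fun acc h => pvBpass (l.length - h - 1) acc) l =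
      pvOrdenarFusion l := by
  obtain ⟨s, hfold, hsort, hperm⟩ := bubble_sorts l
  rw [hfold]
  refine List.eq_of_perm_of_sorted (fun a b _ _ hab hba => le_antisymm hab hba) hsort
    (pvOrdenarFusion_sorted l) (hperm.trans (pvOrdenarFusion_perm l).symm)

-- the port-A fold, with its pyRange/Int indices, is the Nat-level bubble computation
theorem portA_fold_eq (l : List Int) :
    (PySem.List.pyRange 0 (l.length : Int)).foldl
      (fun acc h =>
        (PySem.List.pyRange 0 ((l.length : Int) - h - 1)).foldl
          (fun acc2 y => pvSwapStep acc2 y.toNat) acc) l =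
    pvOrdenarFusion l := by
  rw [← bubble_eq_fusion]
  rw [PySem.List.pyRange_zero_nat, List.foldl_map]
  have hfun : (fun (acc : List Int) (h : Nat) =>
      (PySem.List.pyRange 0 ((l.length : Int) - (h : Int) - 1)).foldl
        (fun acc2 y => pvSwapStep acc2 y.toNat) acc) =
      (fun acc h => pvBpass (l.length - h - 1) acc) := by
    funext acc h
    rw [PySem.List.pyRange_zero, List.foldl_map]
    have hcast : ((l.length : Int) - (h : Int) - 1).toNat = l.length - h - 1 := by omega
    rw [hcast]
    have e : (fun (acc2 : List Int) (y : Nat) => pvSwapStep acc2 ((y : Int)).toNat) =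
        (fun acc2 y => pvSwapStep acc2 y) := by
      funext acc2 y; simp
    rw [e, foldl_swap_range]
  rw [hfun]

-- ===== VERDICT (by name: the statement is the Claim_ definition above) =====
theorem ordenar_matriz_spec : Claim_equal_ordenar_matriz := by
  intro matriz _ _
  unfold Spec_ordenar_matriz ordenar_matriz ordenar_matriz_alt
  simp only
  rw [portA_fold_eq]
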